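-- pv_equiv track=rewrite | github.com/Pranav12345678910/Solving-n-puzzle | puzzle.py | constructGoal
-- ===== SOURCE A (Python) =====
-- def constructGoal(state):
--     goal = []
--     latest = 0
--     for y in range(len(state)):
--         goal_row = []
--         for x in range(len(state)):
--             if latest == 0:
--                 goal_row.append("1")
--                 latest += 1
--                 continue
--             goal_row.append(str(latest + 1))
--             latest += 1
--         goal.append(goal_row)
--     goal[len(state) - 1][len(state) - 1] = "*"
--     return tuple(map(tuple, goal))
-- ===== SOURCE B (Python) =====
-- def constructGoal(state):
--     n = len(state)
--     nums = [str(i) for i in range(1, n * n + 1)]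
--     nums[-1] = "*"
--     return tuple(tuple(nums[r * n:(r + 1) * n]) for r in range(n))
-- ===== Notes on version B (the rewrite author's own statement) =====
-- stated objective: simpler
-- what changed: B replaces A's nested loop with a maintained 'latest' counter and its redundant latest==0 branch by a single flat list comprehension [str(1)..str(n*n)], one assignment nums[-1]='*', and a reshape into rows of length n.
import Mathlib
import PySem

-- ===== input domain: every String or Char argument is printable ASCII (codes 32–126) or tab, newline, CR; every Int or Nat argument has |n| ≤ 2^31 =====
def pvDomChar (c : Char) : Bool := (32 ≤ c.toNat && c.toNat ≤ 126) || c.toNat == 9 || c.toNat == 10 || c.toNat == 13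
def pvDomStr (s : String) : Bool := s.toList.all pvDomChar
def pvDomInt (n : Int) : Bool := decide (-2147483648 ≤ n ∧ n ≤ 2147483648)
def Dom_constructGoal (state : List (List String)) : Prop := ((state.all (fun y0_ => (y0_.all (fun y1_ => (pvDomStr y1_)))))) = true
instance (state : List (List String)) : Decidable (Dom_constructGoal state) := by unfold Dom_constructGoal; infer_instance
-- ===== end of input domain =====

-- ===== PORT A =====
-- B builds the flat list of labels once and reshapes it into rows (simpler decomposition);
-- return-value equivalence is proved for nonempty state (both Pythons raise IndexError on []).
def aInner (acc2 : List String × Int) (_x : Nat) : List String × Int :=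
  if acc2.2 = 0 then (acc2.1 ++ ["1"], acc2.2 + 1)
  else (acc2.1 ++ [PySem.Int.toStr (acc2.2 + 1)], acc2.2 + 1)

def aOuter (n : Nat) (acc : List (List String) × Int) (_y : Nat) : List (List String) × Int :=
  let inner := (List.range n).foldl aInner ([], acc.2)
  (acc.1 ++ [inner.1], inner.2)

def constructGoal (state : List (List String)) : List (List String) :=
  let n := state.length
  let goal := ((List.range n).foldl (aOuter n) ([], 0)).1
  goal.set (n - 1) ((goal.getD (n - 1) []).set (n - 1) "*")

-- ===== PORT B =====
def constructGoal_alt (state : List (List String)) : List (List String) :=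
  let n := state.length
  let nums := (List.range (n * n)).map (fun (i : Nat) => PySem.Int.toStr ((i : Int) + 1))
  let nums' := nums.set (n * n - 1) "*"
  (List.range n).map (fun (r : Nat) => (nums'.drop (r * n)).take n)

-- ===== PRECONDITION & SPEC =====
-- Pre_ excludes only the empty list, on which A's goal[len(state)-1] raises IndexError
-- (B's nums[-1] = "*" raises IndexError there too).
def Pre_constructGoal (state : List (List String)) : Prop := state ≠ []
instance (state : List (List String)) : Decidable (Pre_constructGoal state) := by unfold Pre_constructGoal; infer_instance
def pvWitness_constructGoal : List (List String) := [["1"]]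
def Spec_constructGoal (state : List (List String)) (out : List (List String)) : Prop := out = constructGoal_alt state
instance (state : List (List String)) (out : List (List String)) : Decidable (Spec_constructGoal state out) := by unfold Spec_constructGoal; infer_instance

-- ===== CLAIM (what is proved, stated in full; the proofs are below) =====
def Claim_equal_constructGoal : Prop := ∀ (state : List (List String)), Dom_constructGoal state → Pre_constructGoal state → Spec_constructGoal state (constructGoal state)

-- ===== LEMMAS AND PROOFS =====
lemma aInner_spec (n : Nat) (row : List String) (L : Int) (hL : 0 ≤ L) :
    (List.range n).foldl aInner (row, L)
      = (row ++ (List.range n).map (fun (x : Nat) => PySem.Int.toStr (L + (x : Int) + 1)), L + n) := by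
  induction n with
  | zero => simp
  | succ n ih =>
    rw [List.range_succ, List.foldl_append, ih]
    simp only [List.foldl_cons, List.foldl_nil, aInner]
    rw [List.map_append]
    split_ifs with h
    · have h1 : L = 0 := by omega
      have h2 : n = 0 := by omega
      subst h1; subst h2
      norm_num
      decide
    · push_cast
      simp [List.append_assoc]
      omega

lemma aOuter_spec (n m : Nat) (goal : List (List String)) (L : Int) (hL : 0 ≤ L) :
    (List.range m).foldl (aOuter n) (goal, L)
      = (goal ++ (List.range m).map (fun (y : Nat) =>
            (List.range n).map (fun (x : Nat) => PySem.Int.toStr (L + (y : Int) * n + (x : Int) + 1))),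
         L + m * n) := by
  induction m generalizing goal L with
  | zero => simp
  | succ m ih =>
    rw [List.range_succ, List.foldl_append, ih goal L hL]
    simp only [List.foldl_cons, List.foldl_nil, aOuter]
    rw [aInner_spec n [] (L + m * n) (by positivity)]
    rw [List.map_append]
    simp only [Prod.mk.injEq]
    refine ⟨?_, ?_⟩
    · simp [List.append_assoc]
    · push_cast; ring


lemma cell_eq (m y x : Nat) (hy : y ≤ m) (hx : x ≤ m) :
    (y * (m + 1) + x = m * (m + 1) + m) ↔ (y = m ∧ x = m) := by
  constructor
  · intro h
    by_cases hym : y = m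
    · subst hym
      exact ⟨rfl, Nat.add_left_cancel h⟩
    · exfalso
      have h1 : y + 1 ≤ m := by omega
      nlinarith
  · rintro ⟨rfl, rfl⟩; rfl

lemma grids_eq (m : Nat) :
    ((((List.range (m+1)).foldl (aOuter (m+1)) ([], 0)).1).set m
        (((((List.range (m+1)).foldl (aOuter (m+1)) ([], 0)).1).getD m []).set m "*"))
      = (List.range (m+1)).map (fun (r : Nat) =>
          (((((List.range ((m+1)*(m+1))).map (fun (i : Nat) => PySem.Int.toStr ((i:Int)+1))).set
              ((m+1)*(m+1) - 1) "*").drop (r*(m+1))).take (m+1))) := by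
  have hG : (((List.range (m+1)).foldl (aOuter (m+1)) ([], 0)).1)
      = (List.range (m+1)).map (fun (y : Nat) =>
          (List.range (m+1)).map (fun (x : Nat) => PySem.Int.toStr (((y:Int)*((m:Int)+1) + (x:Int) + 1)))) := by
    rw [aOuter_spec (m+1) (m+1) [] 0 le_rfl]
    push_cast
    simp
  rw [hG]
  have hNN : (m+1)*(m+1) - 1 = m*(m+1) + m := by
    have h : (m+1)*(m+1) = m*(m+1) + m + 1 := by ring
    rw [h]
    exact Nat.succ_sub_one _
  have hlen : ((List.range ((m+1)*(m+1))).map (fun (i : Nat) => PySem.Int.toStr ((i:Int)+1))).length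
      = (m+1)*(m+1) := by simp
  apply List.ext_getElem
  · simp
  · intro y hy1 hy2
    have hy : y < m + 1 := by simpa using hy2
    have hfit : y*(m+1) + (m+1) ≤ (m+1)*(m+1) := by
      calc y*(m+1) + (m+1) = (y+1)*(m+1) := by ring
        _ ≤ (m+1)*(m+1) := Nat.mul_le_mul_right (m+1) hy
    simp only [List.getElem_map, List.getElem_range, List.getElem_set]
    by_cases hym : m = y
    · rw [if_pos hym]
      subst hym
      rw [List.getD_eq_getElem _ _ (by simp)]
      simp only [List.getElem_map, List.getElem_range]
      apply List.ext_getElem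
      · simp
        omega
      · intro x hx1 hx2
        have hx : x < m + 1 := by simp at hx1; omega
        have hlt : m*(m+1) + x < (m+1)*(m+1) := by omega
        simp only [List.getElem_set, List.getElem_take, List.getElem_drop, List.getElem_map,
          List.getElem_range, hNN]
        by_cases hxm : x = m
        · subst hxm; simp
        · rw [if_neg (by omega), if_neg (fun h => hxm (Nat.add_left_cancel h).symm)]
          congr 1
    · rw [if_neg hym]
      apply List.ext_getElem
      · simp
        omega
      · intro x hx1 hx2
        have hx : x < m + 1 := by simp at hx1; omega
        have hlt : y*(m+1) + x < (m+1)*(m+1) := by omega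
        simp only [List.getElem_set, List.getElem_take, List.getElem_drop, List.getElem_map,
          List.getElem_range, hNN]
        rw [if_neg (fun h => hym (((cell_eq m y x (by omega) (by omega)).mp h.symm).1.symm))]
        congr 1

-- ===== VERDICT (by name: the statement is the Claim_ definition above) =====
theorem constructGoal_spec : Claim_equal_constructGoal := by
  intro state _ hpre
  cases state with
  | nil => exact absurd rfl hpre
  | cons a l =>
    unfold Spec_constructGoal constructGoal constructGoal_alt
    simp only [List.length_cons, Nat.add_sub_cancel]
    exact grids_eq l.length
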